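-- pv_equiv track=rewrite | github.com/EnzoBrancaccio/ptrack | Tracked/tracked/trackingHelpers.py | reverseExpression
-- ===== SOURCE A (Python) =====
-- def reverseExpression(expr, position = None, swapped = False):
--     if(isinstance(expr, list)):
--         if(position >= len(expr)):
--             return ""
--         else:
--             resultList = list()
--
--             n = 0
--             i = position
--             for x in range(position, len(expr)):
--                 n = n - is_operator(expr[x])
--                 if(n < 0):
--                     break
--                 else:
--                     n = n + 1
--                     i = i + 1
--
--             for y in range(position, i):
--                 resultList.append(expr[y])
--
--             is_rhs = swapped or (((i - 1) >= 0) and (expr[i-1] == "swap"))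
--             is_commutative = (expr[i] == "+") or (expr[i] == "*")
--             if(is_commutative):
--                 if(is_rhs):
--                     resultList.append("swap")
--                     resultList.append(inverse_op(expr[i]))
--                 else:
--                     resultList.append(inverse_op(expr[i]))
--             else:
--                 if(is_rhs):
--                     resultList.append(expr[i])
--                 else:
--                     resultList.append(inverse_op(expr[i]))
--             resultString = ";".join(resultList)
--
--             return reverseExpression(expr, i + 1, (expr[i] == "swap")) + resultString
--     elif(isinstance(expr, str)):
--         exprList = expr.split(";")
--         return reverseExpression(exprList, 0)
--     else:
--         return ""
--
-- def inverse_op(operator):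
--     if(operator == "+"):
--         return "-"
--     elif(operator == "-"):
--         return "+"
--     elif(operator == "*"):
--         return "/"
--     elif(operator == "/"):
--         return "*"
--     elif(operator == "swap"):
--         return "swap"
--     elif(operator == "sin"):
--         return "asin"
--     elif(operator == "cos"):
--         return "acos"
--     elif(operator == "asin"):
--         return "sin"
--     elif(operator == "acos"):
--         return "cos"
--     else:
--         raise ValueError("no valid operator '" + operator + "'")
--
-- def is_operator(token):
--     if(token == "+"):
--         return 2
--     elif(token == "-"):
--         return 2;
--     elif(token == "*"):
--         return 2;
--     elif(token == "/"):
--         return 2;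
--     elif(token == "sin"):
--         return 1;
--     elif(token == "cos"):
--         return 1;
--     elif(token == "asin"):
--         return 1;
--     elif(token == "acos"):
--         return 1;
--     elif(token == "swap"):
--         return 1;
--     else:
--         return 0
-- ===== SOURCE B (Python) =====
-- def _arity(token):
--     if token in ("+", "-", "*", "/"):
--         return 2
--     if token in ("sin", "cos", "asin", "acos", "swap"):
--         return 1
--     return 0
--
-- def _inverse(op):
--     table = {"+": "-", "-": "+", "*": "/", "/": "*", "swap": "swap",
--              "sin": "asin", "cos": "acos", "asin": "sin", "acos": "cos"}
--     if op not in table: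
--         raise ValueError("no valid operator '" + op + "'")
--     return table[op]
--
-- def reverseExpression(expr, position=None, swapped=False):
--     if isinstance(expr, str):
--         return reverseExpression(expr.split(";"), 0)
--     if not isinstance(expr, list):
--         return ""
--     segments = []
--     pos = position
--     sw = swapped
--     while pos < len(expr):
--         # balance scan: find the operator index i closing the segment at pos
--         n = 0
--         i = pos
--         while n - _arity(expr[i]) >= 0:
--             n = n - _arity(expr[i]) + 1
--             i += 1
--         op = expr[i]
--         is_rhs = sw or (i - 1 >= 0 and expr[i - 1] == "swap")
--         if op == "+" or op == "*":
--             piece = (["swap"] if is_rhs else []) + [_inverse(op)]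
--         else:
--             piece = [op if is_rhs else _inverse(op)]
--         segments.append(";".join(expr[pos:i] + piece))
--         sw = (op == "swap")
--         pos = i + 1
--     return "".join(reversed(segments))
-- ===== Notes on version B (the rewrite author's own statement) =====
-- stated objective: alternative
-- what changed: A assembles the result by right-recursion (recursive call on the rest of the expression prepended to each segment string); B runs one iterative left-to-right loop that threads the swapped flag, collects each segment string in a list, and finally concatenates the collected strings in reversed order.
-- outside the precondition, e.g. on reverseExpression(';', None, False): A raises IndexError, B raises IndexError
import Mathlib
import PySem

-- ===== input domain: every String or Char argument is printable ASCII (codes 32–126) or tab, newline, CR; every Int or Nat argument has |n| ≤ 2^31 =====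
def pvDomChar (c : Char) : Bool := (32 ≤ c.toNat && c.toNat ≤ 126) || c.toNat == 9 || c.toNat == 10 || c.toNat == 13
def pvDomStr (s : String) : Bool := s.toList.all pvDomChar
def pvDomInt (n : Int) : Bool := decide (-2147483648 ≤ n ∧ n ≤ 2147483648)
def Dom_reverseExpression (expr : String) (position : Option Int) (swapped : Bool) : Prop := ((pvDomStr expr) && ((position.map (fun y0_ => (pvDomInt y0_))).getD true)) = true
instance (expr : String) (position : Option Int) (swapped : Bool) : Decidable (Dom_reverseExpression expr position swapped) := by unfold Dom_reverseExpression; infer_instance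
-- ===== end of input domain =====

-- B replaces A's right-recursive segment recursion by an iterative left-to-right loop that collects
-- the segment strings in a list and concatenates them in reversed order (objective: alternative
-- decomposition, same cost). Return-value equivalence only; neither version mutates its arguments.

-- ===== PORT A =====
-- is_operator (shared table helper)
def pvIsOp (t : String) : Int :=
  if t = "+" then 2 else if t = "-" then 2 else if t = "*" then 2 else if t = "/" then 2
  else if t = "sin" then 1 else if t = "cos" then 1 else if t = "asin" then 1
  else if t = "acos" then 1 else if t = "swap" then 1 else 0

-- inverse_op; on any other token Python raises ValueError — unreachable here, because both
-- programs only apply it to a token whose pvIsOp is ≥ 1 (the balance scan breaks only on operators)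
def pvInv (t : String) : String :=
  if t = "+" then "-" else if t = "-" then "+" else if t = "*" then "/" else if t = "/" then "*"
  else if t = "swap" then "swap" else if t = "sin" then "asin" else if t = "cos" then "acos"
  else if t = "asin" then "sin" else if t = "acos" then "cos" else ""

-- the body of A's 'for x in range(position, len(expr))' scan: state (n, i, broke)
def pvStepA (tokens : List String) (s : Int × Int × Bool) (x : Int) : Int × Int × Bool :=
  if s.2.2 then s
  else
    let n := s.1 - pvIsOp (PySem.List.pyGetD tokens x "")
    if n < 0 then (n, s.2.1, true) else (n + 1, s.2.1 + 1, false)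

-- termination helper for pvRevA (the scan never moves i backwards)
theorem pvStepA_foldl_ge (tokens : List String) (l : List Int) :
    ∀ (n i : Int) (b : Bool), i ≤ (l.foldl (pvStepA tokens) (n, i, b)).2.1 := by
  induction l with
  | nil => intro n i b; simp
  | cons x xs ih =>
    intro n i b
    rw [List.foldl_cons]
    cases b with
    | true =>
      have hs : pvStepA tokens (n, i, true) x = (n, i, true) := rfl
      rw [hs]; exact ih n i true
    | false =>
      have hred : pvStepA tokens (n, i, false) x
          = (if n - pvIsOp (PySem.List.pyGetD tokens x "") < 0
              then (n - pvIsOp (PySem.List.pyGetD tokens x ""), i, true)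
              else (n - pvIsOp (PySem.List.pyGetD tokens x "") + 1, i + 1, false)) := rfl
      by_cases hc : n - pvIsOp (PySem.List.pyGetD tokens x "") < 0
      · rw [hred, if_pos hc]; exact ih _ i true
      · rw [hred, if_neg hc]; exact le_trans (Int.le_add_one le_rfl) (ih _ (i + 1) false)

-- bound used by the termination arguments: a successful pyGet? means the index is below the length
theorem pvGet_lt (tokens : List String) (i : Int) (t : String)
    (h : PySem.List.pyGet? tokens i = some t) : i < (tokens.length : Int) := by
  rcases lt_or_ge i (tokens.length : Int) with h' | h'
  · exact h'
  · rw [(PySem.List.pyGet?_eq_none_iff tokens i).2 (fun hr => absurd hr.2 (not_lt.2 h'))] at h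
    cases h

def pvScanA (tokens : List String) (position : Int) : Int :=
  ((PySem.List.pyRange position tokens.length).foldl (pvStepA tokens) (0, position, false)).2.1

-- termination of pvRevA: the next position pvScanA+1 strictly shrinks the measure
theorem pvRevA_dec (tokens : List String) (position : Int)
    (h : ¬ position ≥ (tokens.length : Int)) :
    ((tokens.length : Int) - (pvScanA tokens position + 1)).toNat
      < ((tokens.length : Int) - position).toNat := by
  have hge : position ≤ pvScanA tokens position := pvStepA_foldl_ge tokens _ 0 position false
  omega

-- A's list branch (the recursive case of reverseExpression on a token list)
def pvRevA (tokens : List String) (position : Int) (swapped : Bool) : String :=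
  if position ≥ (tokens.length : Int) then ""
  else
    -- i = end of the scan, front = expr[position:i] copied element by element (locals inlined)
    match PySem.List.pyGet? tokens (pvScanA tokens position) with
    | none => ""   -- Python raises IndexError at expr[i] here; excluded by Pre_
    | some op =>
      pvRevA tokens (pvScanA tokens position + 1) (decide (op = "swap")) ++
        PySem.Str.join ";"
          ((PySem.List.pyRange position (pvScanA tokens position)).map (fun y => PySem.List.pyGetD tokens y "") ++
            (if op = "+" ∨ op = "*" then
              (if (swapped || (decide ((0:Int) ≤ pvScanA tokens position - 1) && decide (PySem.List.pyGetD tokens (pvScanA tokens position - 1) "" = "swap"))) then ["swap", pvInv op] else [pvInv op])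
            else
              (if (swapped || (decide ((0:Int) ≤ pvScanA tokens position - 1) && decide (PySem.List.pyGetD tokens (pvScanA tokens position - 1) "" = "swap"))) then [op] else [pvInv op])))
termination_by ((tokens.length : Int) - position).toNat
decreasing_by exact pvRevA_dec tokens position (by assumption)

-- top level: expr is a str, so A splits on ';' and recurses on the list with position 0
def reverseExpression (expr : String) (position : Option Int) (swapped : Bool) : String :=
  pvRevA ((PySem.Str.split? expr ";").getD []) 0 false   -- sep ";" ≠ "", so split? is always some

-- ===== PORT B =====
-- B's inner 'while n - arity(expr[i]) >= 0' balance scan (Source B); on an out-of-range i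
-- Python raises IndexError (excluded by Pre_) — the port stops and returns i there
theorem pvScanB_dec (tokens : List String) (i : Int) (t : String)
    (h : PySem.List.pyGet? tokens i = some t) :
    ((tokens.length : Int) - (i + 1)).toNat < ((tokens.length : Int) - i).toNat := by
  have := pvGet_lt tokens i t h
  omega

def pvScanB (tokens : List String) (n i : Int) : Int :=
  match h : PySem.List.pyGet? tokens i with
  | none => i
  | some t => if n - pvIsOp t ≥ 0 then pvScanB tokens (n - pvIsOp t + 1) (i + 1) else i
termination_by ((tokens.length : Int) - i).toNat
decreasing_by exact pvScanB_dec tokens i t h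

-- termination helper for pvRevB
theorem pvScanB_ge (tokens : List String) : ∀ (n i : Int), i ≤ pvScanB tokens n i := by
  intro n i
  fun_induction pvScanB tokens n i with
  | case1 => omega
  | case2 n i t h hge ih => omega
  | case3 => omega

-- termination of pvRevB, same measure as pvRevA's
theorem pvRevB_dec (tokens : List String) (pos : Int) :
    ((tokens.length : Int) - (pvScanB tokens 0 pos + 1)).toNat
      < ((tokens.length : Int) - pos).toNat ∨ ¬ pos < (tokens.length : Int) := by
  have hge : pos ≤ pvScanB tokens 0 pos := pvScanB_ge tokens 0 pos
  omega

-- B's outer while loop: segs accumulates the segment strings, joined reversed at the end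
def pvRevB (tokens : List String) (pos : Int) (sw : Bool) (segs : List String) : String :=
  if pos < (tokens.length : Int) then
    -- i = pvScanB tokens 0 pos, seg = ';'.join(expr[pos:i] + piece) (locals inlined)
    match PySem.List.pyGet? tokens (pvScanB tokens 0 pos) with
    | none => PySem.Str.join "" segs.reverse   -- Python raised IndexError inside the scan; excluded by Pre_
    | some op =>
      pvRevB tokens (pvScanB tokens 0 pos + 1) (decide (op = "swap"))
        (segs ++ [PySem.Str.join ";"
          (PySem.List.slice tokens (some pos) (some (pvScanB tokens 0 pos)) ++
            (if op = "+" ∨ op = "*" then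
              (if (sw || (decide ((0:Int) ≤ pvScanB tokens 0 pos - 1) && decide (PySem.List.pyGetD tokens (pvScanB tokens 0 pos - 1) "" = "swap"))) then ["swap"] else []) ++ [pvInv op]
            else
              [if (sw || (decide ((0:Int) ≤ pvScanB tokens 0 pos - 1) && decide (PySem.List.pyGetD tokens (pvScanB tokens 0 pos - 1) "" = "swap"))) then op else pvInv op]))])
  else PySem.Str.join "" segs.reverse
termination_by ((tokens.length : Int) - pos).toNat
decreasing_by exact (pvRevB_dec tokens pos).resolve_right (by simpa using ‹pos < (tokens.length : Int)›)

def reverseExpression_alt (expr : String) (position : Option Int) (swapped : Bool) : String :=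
  pvRevB ((PySem.Str.split? expr ";").getD []) 0 false []

-- ===== PRECONDITION & SPEC =====
-- Python A raises IndexError exactly when the final segment's balance scan runs off the end of the
-- token list; Pre_ keeps exactly the well-formed inputs: one linear
-- balance pass over the ';'-tokens (arity subtracted, +1 per token, reset after each closing
-- operator) must end on a closing operator.
def Pre_reverseExpression (expr : String) (position : Option Int) (swapped : Bool) : Prop :=
  (((PySem.Str.split? expr ";").getD []).foldl
    (fun (s : Int × Bool) t =>
      let m := s.1 - pvIsOp t
      if m < 0 then (0, true) else (m + 1, false)) (0, false)).2 = true
instance (expr : String) (position : Option Int) (swapped : Bool) : Decidable (Pre_reverseExpression expr position swapped) := by unfold Pre_reverseExpression; infer_instance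

def pvWitness_reverseExpression : String × Option Int × Bool := ("2;*;swap;3;+", none, false)

def Spec_reverseExpression (expr : String) (position : Option Int) (swapped : Bool) (out : String) : Prop := out = reverseExpression_alt expr position swapped
instance (expr : String) (position : Option Int) (swapped : Bool) (out : String) : Decidable (Spec_reverseExpression expr position swapped out) := by unfold Spec_reverseExpression; infer_instance

-- ===== CLAIM (what is proved, stated in full; the proofs are below) =====
def Claim_equal_reverseExpression : Prop := ∀ (expr : String) (position : Option Int) (swapped : Bool), Dom_reverseExpression expr position swapped → Pre_reverseExpression expr position swapped → Spec_reverseExpression expr position swapped (reverseExpression expr position swapped)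

-- ===== LEMMAS AND PROOFS =====

-- a broken scan state is fixed under the rest of the fold
theorem pvStepA_foldl_broke (tokens : List String) (l : List Int) :
    ∀ (n i : Int), l.foldl (pvStepA tokens) (n, i, true) = (n, i, true) := by
  induction l with
  | nil => intro n i; rfl
  | cons x xs ih =>
    intro n i
    rw [List.foldl_cons]
    have hs : pvStepA tokens (n, i, true) x = (n, i, true) := rfl
    rw [hs]; exact ih n i

-- the two balance scans agree (A's for/break fold = B's while recursion), for any start balance n
theorem pvScan_eq (tokens : List String) :
    ∀ (k : Nat) (j n : Int), 0 ≤ j → ((tokens.length : Int) - j).toNat = k →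
      ((PySem.List.pyRange j tokens.length).foldl (pvStepA tokens) (n, j, false)).2.1
        = pvScanB tokens n j := by
  intro k
  induction k using Nat.strong_induction_on with
  | _ k ih =>
    intro j n hj hk
    by_cases hlt : j < (tokens.length : Int)
    · rw [PySem.List.pyRange_one_cons hlt, List.foldl_cons]
      have hjget : PySem.List.pyGet? tokens j = some tokens[j.toNat] :=
        PySem.List.pyGet?_eq_some_getElem tokens hj hlt
      have hjd : PySem.List.pyGetD tokens j "" = tokens[j.toNat] :=
        PySem.List.pyGetD_eq_getElem tokens "" hj hlt
      rw [pvScanB, hjget]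
      by_cases hneg : n - pvIsOp tokens[j.toNat] < 0
      · have hs : pvStepA tokens (n, j, false) j = (n - pvIsOp tokens[j.toNat], j, true) := by
          simp [pvStepA, hjd, hneg]
        rw [hs, pvStepA_foldl_broke]
        simp only [if_neg (by omega : ¬ n - pvIsOp tokens[j.toNat] ≥ 0)]
      · have hs : pvStepA tokens (n, j, false) j = (n - pvIsOp tokens[j.toNat] + 1, j + 1, false) := by
          simp [pvStepA, hjd, hneg]
        rw [hs]
        simp only [if_pos (by omega : n - pvIsOp tokens[j.toNat] ≥ 0)]
        exact ih (((tokens.length : Int) - (j + 1)).toNat) (by omega) (j + 1) _ (by omega) rfl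
    · rw [PySem.List.pyRange_one_eq_nil (by omega), List.foldl_nil,
        pvScanB, (PySem.List.pyGet?_eq_none_iff tokens j).2 (by unfold PySem.Raise.InRange; omega)]

theorem pvScanAB (tokens : List String) (j : Int) (hj : 0 ≤ j) :
    pvScanA tokens j = pvScanB tokens 0 j := by
  unfold pvScanA
  exact pvScan_eq tokens _ j 0 hj rfl

-- A's element-by-element copy of expr[position:i] equals B's slice
theorem pvFront_eq_slice (tokens : List String) :
    ∀ (k : Nat) (p i : Int), 0 ≤ p → p ≤ i → i ≤ (tokens.length : Int) → (i - p).toNat = k →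
      (PySem.List.pyRange p i).map (fun y => PySem.List.pyGetD tokens y "")
        = PySem.List.slice tokens (some p) (some i) := by
  intro k
  induction k with
  | zero =>
    intro p i hp hpi hi hk
    have : i = p := by omega
    subst this
    rw [PySem.List.pyRange_one_eq_nil (by omega), PySem.List.slice_toNat tokens hp hp]
    simp
  | succ m ih =>
    intro p i hp hpi hi hk
    have hplt : p < i := by omega
    have hrec := ih (p + 1) i (by omega) (by omega) hi (by omega)
    rw [PySem.List.pyRange_one_cons hplt, List.map_cons, hrec,
      PySem.List.slice_toNat tokens hp (by omega), PySem.List.slice_toNat tokens (by omega) (by omega),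
      PySem.List.pyGetD_eq_getElem tokens "" hp (by omega)]
    have hdrop : tokens.drop p.toNat = tokens[p.toNat] :: tokens.drop (p + 1).toNat := by
      have hsn : (p + 1).toNat = p.toNat + 1 := by omega
      rw [List.drop_eq_getElem_cons (by omega), hsn]
    rw [hdrop]
    have hnum : i.toNat - p.toNat = (i.toNat - (p + 1).toNat) + 1 := by omega
    rw [hnum, List.take_succ_cons]

-- ''.join over a cons
theorem pvJoin_empty_cons (s : String) (r : List String) :
    PySem.Str.join "" (s :: r) = s ++ PySem.Str.join "" r := by
  apply String.toList_inj.mp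
  simp [PySem.Str.toList_join]
  cases r with
  | nil => simp [PySem.Chars.join, List.intercalate]
  | cons a t => simp [PySem.Chars.join_cons_cons]

-- loop invariant: B's accumulator run equals A's recursion followed by the already-collected
-- segments in reversed order
theorem pvRev_eq (tokens : List String) :
    ∀ (k : Nat) (pos : Int) (sw : Bool) (segs : List String), 0 ≤ pos →
      ((tokens.length : Int) - pos).toNat = k →
      pvRevB tokens pos sw segs = pvRevA tokens pos sw ++ PySem.Str.join "" segs.reverse := by
  intro k
  induction k using Nat.strong_induction_on with
  | _ k ih =>
    intro pos sw segs hpos hk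
    by_cases hlt : pos < (tokens.length : Int)
    · rw [pvRevB, pvRevA, if_pos hlt, if_neg (show ¬ pos ≥ (tokens.length : Int) by omega)]
      have hAB : pvScanA tokens pos = pvScanB tokens 0 pos := pvScanAB tokens pos hpos
      rw [← hAB]
      have hige : pos ≤ pvScanA tokens pos := hAB ▸ pvScanB_ge tokens 0 pos
      generalize hgen : pvScanA tokens pos = i at hige hAB ⊢
      cases hop : PySem.List.pyGet? tokens i with
      | none => exact String.empty_append.symm
      | some op =>
        have hilt : i < (tokens.length : Int) := pvGet_lt tokens i op hop
        simp only []
        rw [ih (((tokens.length : Int) - (i + 1)).toNat) (by omega) (i + 1) _ _ (by omega) rfl,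
          List.reverse_append, List.reverse_singleton, List.singleton_append, pvJoin_empty_cons,
          ← String.append_assoc]
        congr 2
        rw [pvFront_eq_slice tokens ((i - pos).toNat) pos i hpos hige (by omega) rfl]
        congr 1
        by_cases hc : op = "+" ∨ op = "*" <;>
          cases hr : (sw || (decide ((0:Int) ≤ i - 1) && decide (PySem.List.pyGetD tokens (i - 1) "" = "swap"))) <;>
          first
          | simp [hc]
          | simp [hc, hr]
    · rw [pvRevB, pvRevA, if_neg hlt, if_pos (by omega)]
      exact String.empty_append.symm

-- ===== VERDICT (by name: the statement is the Claim_ definition above) =====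
theorem reverseExpression_spec : Claim_equal_reverseExpression := by
  intro expr position swapped _ _
  unfold Spec_reverseExpression reverseExpression reverseExpression_alt
  rw [pvRev_eq _ _ 0 false [] le_rfl rfl]
  apply String.toList_inj.mp
  simp [PySem.Str.toList_join, PySem.Chars.join_nil]
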